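-- pv_equiv track=rewrite | github.com/Yuyuhiei/conso-web-ide | server/transpiler.py | _count_array_elements
-- ===== SOURCE A (Python) =====
-- def _count_array_elements(initializer_tokens):
--     """Count the number of elements in a 1D array initializer."""
--     if not initializer_tokens or initializer_tokens[0][0] != '{':
--         return 0
--
--     elements = 0
--     brace_level = 0
--     in_element = False
--
--     for token_type, _ in initializer_tokens:
--         if token_type == '{':
--             brace_level += 1
--             if brace_level == 1:
--                 # Start of outermost array
--                 continue
--         elif token_type == '}':
--             brace_level -= 1
--             if brace_level == 0 and in_element:
--                 # End of element
--                 elements += 1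
--                 in_element = False
--         elif brace_level == 1:
--             if token_type == ',':
--                 if in_element:
--                     elements += 1
--                 in_element = False
--             elif token_type in ['ntlit', 'dbllit', 'blnlit', 'chrlit', 'strnglit', 'id', 'tr', 'fls']:
--                 if not in_element:
--                     in_element = True
--
--     return elements
-- ===== SOURCE B (Python) =====
-- def _count_array_elements(initializer_tokens):
--     """Count the number of elements in a 1D array initializer."""
--     if not initializer_tokens or initializer_tokens[0][0] != '{':
--         return 0
--     values = ('ntlit', 'dbllit', 'blnlit', 'chrlit', 'strnglit', 'id', 'tr', 'fls')
--     # Reduce the token stream to a string of significant symbols: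
--     # 'B' for an element boundary (a level-1 comma, or the '}' closing the
--     # outer braces), 'V' for a value-type token at level 1.
--     syms = []
--     level = 0
--     for token_type, _ in initializer_tokens:
--         if token_type == '{':
--             level += 1
--         elif token_type == '}':
--             level -= 1
--             if level == 0:
--                 syms.append('B')
--         elif level == 1:
--             if token_type == ',':
--                 syms.append('B')
--             elif token_type in values:
--                 syms.append('V')
--     # An element is counted exactly at a boundary directly preceded by a value.
--     return sum(1 for a, b in zip(syms, syms[1:]) if a == 'V' and b == 'B')
-- ===== Notes on version B (the rewrite author's own statement) =====
-- stated objective: alternative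
-- what changed: B replaces A's inline counter with an in_element flag by reducing the token stream to a list of boundary/value symbols and then counting adjacent value-boundary pairs in a separate zip pass.
import Mathlib
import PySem

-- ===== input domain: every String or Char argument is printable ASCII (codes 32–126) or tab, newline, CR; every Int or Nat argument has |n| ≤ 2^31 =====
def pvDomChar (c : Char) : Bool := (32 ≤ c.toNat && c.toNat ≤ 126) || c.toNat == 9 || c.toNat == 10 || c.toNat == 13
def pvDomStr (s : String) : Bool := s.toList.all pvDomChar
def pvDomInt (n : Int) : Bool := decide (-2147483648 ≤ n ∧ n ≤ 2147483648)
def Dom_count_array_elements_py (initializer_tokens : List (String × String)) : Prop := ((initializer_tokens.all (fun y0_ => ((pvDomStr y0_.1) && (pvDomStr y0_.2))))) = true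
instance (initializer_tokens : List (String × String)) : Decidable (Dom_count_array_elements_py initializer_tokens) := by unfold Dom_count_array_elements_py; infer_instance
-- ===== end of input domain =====

-- B replaces A's inline counter + in_element flag by reducing the stream to
-- boundary/value symbols and counting adjacent value-boundary pairs (objective:
-- alternative decomposition, same cost).

def pvValueTypes : List String :=
  ["ntlit", "dbllit", "blnlit", "chrlit", "strnglit", "id", "tr", "fls"]

-- ===== PORT A =====
-- loop body of A's for-loop, state = (elements, brace_level, in_element)
def pvStepA (st : Int × Int × Bool) (tok : String × String) : Int × Int × Bool :=
  let elements := st.1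
  let brace_level := st.2.1
  let in_element := st.2.2
  let token_type := tok.1
  if token_type = "{" then
    (elements, brace_level + 1, in_element)
  else if token_type = "}" then
    if brace_level - 1 = 0 ∧ in_element = true then (elements + 1, brace_level - 1, false)
    else (elements, brace_level - 1, in_element)
  else if brace_level = 1 then
    if token_type = "," then
      ((if in_element then elements + 1 else elements), brace_level, false)
    else if token_type ∈ pvValueTypes then (elements, brace_level, true)
    else (elements, brace_level, in_element)
  else (elements, brace_level, in_element)

def count_array_elements_py (initializer_tokens : List (String × String)) : Int :=
  match initializer_tokens with
  | [] => 0
  | t0 :: _ =>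
    if t0.1 ≠ "{" then 0
    else (initializer_tokens.foldl pvStepA (0, 0, false)).1

-- ===== PORT B =====
-- loop body of B's for-loop, state = (syms, level)
def pvStepB (st : List String × Int) (tok : String × String) : List String × Int :=
  let syms := st.1
  let level := st.2
  let token_type := tok.1
  if token_type = "{" then (syms, level + 1)
  else if token_type = "}" then
    if level - 1 = 0 then (syms ++ ["B"], level - 1) else (syms, level - 1)
  else if level = 1 then
    if token_type = "," then (syms ++ ["B"], level)
    else if token_type ∈ pvValueTypes then (syms ++ ["V"], level)
    else (syms, level)
  else (syms, level)

def count_array_elements_py_alt (initializer_tokens : List (String × String)) : Int :=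
  match initializer_tokens with
  | [] => 0
  | t0 :: _ =>
    if t0.1 ≠ "{" then 0
    else
      let syms := (initializer_tokens.foldl pvStepB ([], 0)).1
      ((syms.zip syms.tail).countP (fun q => q.1 == "V" && q.2 == "B") : Int)

-- ===== PRECONDITION & SPEC =====
def Spec_count_array_elements_py (initializer_tokens : List (String × String)) (out : Int) : Prop := out = count_array_elements_py_alt initializer_tokens
instance (initializer_tokens : List (String × String)) (out : Int) : Decidable (Spec_count_array_elements_py initializer_tokens out) := by unfold Spec_count_array_elements_py; infer_instance

-- ===== CLAIM (what is proved, stated in full; the proofs are below) =====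
def Claim_equal_count_array_elements_py : Prop := ∀ (initializer_tokens : List (String × String)), Dom_count_array_elements_py initializer_tokens → Spec_count_array_elements_py initializer_tokens (count_array_elements_py initializer_tokens)

-- ===== LEMMAS AND PROOFS =====

-- recursive characterisation of B's adjacent-pair count
def pcRec : List String → Int
  | [] => 0
  | [_] => 0
  | a :: b :: t => (if a = "V" ∧ b = "B" then 1 else 0) + pcRec (b :: t)

lemma pc_eq (l : List String) :
    ((l.zip l.tail).countP (fun q => q.1 == "V" && q.2 == "B") : Int) = pcRec l := by
  induction l using pcRec.induct with
  | case1 => simp [pcRec]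
  | case2 => simp [pcRec]
  | case3 a b t ih =>
    simp only [List.tail_cons, List.zip_cons_cons, List.countP_cons, pcRec] at *
    rw [← ih]
    by_cases h : a = "V" ∧ b = "B" <;> simp [h] <;> omega

lemma pcRec_snoc (s : List String) (x : String) :
    pcRec (s ++ [x]) = pcRec s + (if s.getLast? = some "V" ∧ x = "B" then 1 else 0) := by
  induction s using pcRec.induct with
  | case1 => simp [pcRec]
  | case2 a => by_cases h : a = "V" ∧ x = "B" <;> simp [pcRec, h]
  | case3 a b t ih =>
    simp only [List.cons_append, pcRec] at *
    rw [ih]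
    have : (a :: b :: t).getLast? = (b :: t).getLast? := by
      simp [List.getLast?_cons_cons]
    rw [this]
    ring

lemma pv_loop (toks : List (String × String)) : ∀ (syms : List String) (lvl : Int),
    (toks.foldl pvStepA (pcRec syms, lvl, syms.getLast? == some "V")).1
    = pcRec (toks.foldl pvStepB (syms, lvl)).1 := by
  induction toks with
  | nil => intro syms lvl; simp
  | cons t ts ih =>
    intro syms lvl
    simp only [List.foldl_cons]
    by_cases h1 : t.1 = "{"
    · simpa [pvStepA, pvStepB, h1] using ih syms (lvl + 1)
    · by_cases h2 : t.1 = "}"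
      · by_cases h3 : lvl - 1 = 0
        · have hlast : (syms ++ ["B"]).getLast? = some "B" := by
            simp
          by_cases h4 : syms.getLast? = some "V"
          · have : pcRec syms + 1 = pcRec (syms ++ ["B"]) := by
              rw [pcRec_snoc]; simp [h4]
            simpa [pvStepA, pvStepB, h1, h2, h3, h4, hlast, this]
              using ih (syms ++ ["B"]) (lvl - 1)
          · have hf : (syms.getLast? == some "V") = false := by simp [h4]
            have : pcRec syms = pcRec (syms ++ ["B"]) := by
              rw [pcRec_snoc]; simp [h4]
            simpa [pvStepA, pvStepB, h1, h2, h3, h4, hf, hlast, this]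
              using ih (syms ++ ["B"]) (lvl - 1)
        · simpa [pvStepA, pvStepB, h1, h2, h3] using ih syms (lvl - 1)
      · by_cases h5 : lvl = 1
        · by_cases h6 : t.1 = ","
          · have hlast : (syms ++ ["B"]).getLast? = some "B" := by
              simp
            by_cases h4 : syms.getLast? = some "V"
            · have : pcRec syms + 1 = pcRec (syms ++ ["B"]) := by
                rw [pcRec_snoc]; simp [h4]
              simpa [pvStepA, pvStepB, h1, h2, h5, h6, h4, hlast, this]
                using ih (syms ++ ["B"]) lvl
            · have hf : (syms.getLast? == some "V") = false := by simp [h4]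
              have : pcRec syms = pcRec (syms ++ ["B"]) := by
                rw [pcRec_snoc]; simp [h4]
              simpa [pvStepA, pvStepB, h1, h2, h5, h6, h4, hf, hlast, this]
                using ih (syms ++ ["B"]) lvl
          · by_cases h7 : t.1 ∈ pvValueTypes
            · have hlast : (syms ++ ["V"]).getLast? = some "V" := by
                simp
              have : pcRec syms = pcRec (syms ++ ["V"]) := by
                rw [pcRec_snoc]; simp
              simpa [pvStepA, pvStepB, h1, h2, h5, h6, h7, hlast, this]
                using ih (syms ++ ["V"]) lvl
            · simpa [pvStepA, pvStepB, h1, h2, h5, h6, h7] using ih syms lvl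
        · simpa [pvStepA, pvStepB, h1, h2, h5] using ih syms lvl

-- ===== VERDICT (by name: the statement is the Claim_ definition above) =====
theorem count_array_elements_py_spec : Claim_equal_count_array_elements_py := by
  unfold Claim_equal_count_array_elements_py
  intro toks _
  unfold Spec_count_array_elements_py count_array_elements_py count_array_elements_py_alt
  match toks with
  | [] => rfl
  | t0 :: ts =>
    by_cases h : t0.1 ≠ "{"
    · simp [h]
    · simp only [h, if_false]
      rw [pc_eq]
      have := pv_loop (t0 :: ts) [] 0
      simpa [pcRec] using this
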